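-- pv_equiv track=rewrite | github.com/maggomor/advent_of_code_24 | python_code/src/day7/main.py | evaluate_true_values
-- ===== SOURCE A (Python) =====
-- def evaluate_true_values(inputs: list = None):
--     true_vals_sum = 0
--     for tuples in inputs:
--         true_result = tuples[0]
--         for test_result in tuples[1]:
--             sum_val = 0
--             for elem in test_result.split("+"):
--                 if "*" not in elem:
--                     sum_val += int(elem)
--                 elif "*" in elem:
--                     temp = elem.split("*")
--                     val = 1
--                     for num in temp:
--                         val *= int(num)
--                     sum_val += val
--             if int(sum_val) == int(true_result):
--                 true_vals_sum += sum_val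
--     return true_vals_sum
-- ===== SOURCE B (Python) =====
-- def evaluate_true_values(inputs: list = None):
--     def value(expr):
--         acc, prod, buf = 0, 1, ""
--         for ch in expr:
--             if ch == '+':
--                 acc += prod * int(buf)
--                 prod = 1
--                 buf = ""
--             elif ch == '*':
--                 prod *= int(buf)
--                 buf = ""
--             else:
--                 buf += ch
--         return acc + prod * int(buf)
--     return sum(v for target, exprs in inputs
--                  for v in map(value, exprs) if v == target)
-- ===== Notes on version B (the rewrite author's own statement) =====
-- stated objective: alternative
-- what changed: Each expression is evaluated in a single left-to-right character scan with a (sum, product, token-buffer) state machine instead of splitting on '+' and then on '*' into intermediate token lists, and the matching values are summed with one generator expression instead of nested accumulator loops.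
-- outside the precondition, e.g. on evaluate_true_values([(1, ['x'])]): A raises ValueError, B raises ValueError
import Mathlib
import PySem

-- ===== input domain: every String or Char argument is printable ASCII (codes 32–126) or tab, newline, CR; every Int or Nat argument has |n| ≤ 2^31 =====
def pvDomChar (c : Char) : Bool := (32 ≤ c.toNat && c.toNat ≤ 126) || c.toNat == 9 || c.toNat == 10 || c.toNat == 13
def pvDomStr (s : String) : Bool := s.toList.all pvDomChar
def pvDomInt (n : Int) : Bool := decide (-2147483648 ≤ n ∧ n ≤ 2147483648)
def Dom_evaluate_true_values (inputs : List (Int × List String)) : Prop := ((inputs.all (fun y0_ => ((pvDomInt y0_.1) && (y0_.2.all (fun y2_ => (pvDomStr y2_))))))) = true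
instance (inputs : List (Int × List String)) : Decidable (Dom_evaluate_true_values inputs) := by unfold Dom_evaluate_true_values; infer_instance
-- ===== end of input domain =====

-- B evaluates each expression in ONE character scan with a (sum, product, buffer) state machine
-- instead of A's split-on-'+'-then-split-on-'*' token lists; return values agree on Pre_ (no mutation involved).

-- ===== PORT A =====
-- int(s), total under Pre_ (ofChars? is some on every token there)
def pvIntOf (cs : List Char) : Int := (PySem.Int.ofChars? cs).getD 0

-- 'val = 1; for num in temp: val *= int(num)'
def pvProdA (temp : List (List Char)) : Int :=
  temp.foldl (fun val num => val * pvIntOf num) 1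

-- the body of 'for elem in test_result.split("+")'
def pvElemA (sum_val : Int) (elem : List Char) : Int :=
  if PySem.Chars.isIn ['*'] elem = false then sum_val + pvIntOf elem
  else sum_val + pvProdA (PySem.Chars.splitOn elem ['*'])

-- 'sum_val = 0; for elem in test_result.split("+"): …'
def pvSumA (test_result : List Char) : Int :=
  (PySem.Chars.splitOn test_result ['+']).foldl pvElemA 0

def evaluate_true_values (inputs : List (Int × List String)) : Int :=
  inputs.foldl (fun true_vals_sum tuples =>
    tuples.2.foldl (fun true_vals_sum test_result =>
      let sum_val := pvSumA test_result.toList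
      if sum_val = tuples.1 then true_vals_sum + sum_val else true_vals_sum)
      true_vals_sum) 0

-- ===== PORT B =====
-- one step of B's character scan: state (acc, prod, buf)
def pvStepB (st : Int × Int × List Char) (ch : Char) : Int × Int × List Char :=
  if ch = '+' then (st.1 + st.2.1 * pvIntOf st.2.2, 1, [])
  else if ch = '*' then (st.1, st.2.1 * pvIntOf st.2.2, [])
  else (st.1, st.2.1, st.2.2 ++ [ch])

-- B's 'value(expr)'
def pvValueB (expr : List Char) : Int :=
  let st := expr.foldl pvStepB (0, 1, [])
  st.1 + st.2.1 * pvIntOf st.2.2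

-- 'sum(v for target, exprs in inputs for v in map(value, exprs) if v == target)'
def evaluate_true_values_alt (inputs : List (Int × List String)) : Int :=
  (inputs.flatMap (fun p =>
    (p.2.map (fun e => pvValueB e.toList)).filter (fun v => v == p.1))).sum

-- ===== PRECONDITION & SPEC =====
-- Pre_: every token (split on '+' then on '*') of every expression parses as a Python int —
-- exactly the inputs where A's int() calls do not raise ValueError.
def Pre_evaluate_true_values (inputs : List (Int × List String)) : Prop :=
  ∀ p ∈ inputs, ∀ e ∈ p.2, ∀ el ∈ PySem.Chars.splitOn e.toList ['+'],
    ∀ tok ∈ PySem.Chars.splitOn el ['*'], (PySem.Int.ofChars? tok).isSome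
instance (inputs : List (Int × List String)) : Decidable (Pre_evaluate_true_values inputs) := by
  unfold Pre_evaluate_true_values; infer_instance

def pvWitness_evaluate_true_values : (List (Int × List String)) :=
  [(3, ["1+2", "2*2"]), (10, ["2*5"])]

def Spec_evaluate_true_values (inputs : List (Int × List String)) (out : Int) : Prop := out = evaluate_true_values_alt inputs
instance (inputs : List (Int × List String)) (out : Int) : Decidable (Spec_evaluate_true_values inputs out) := by unfold Spec_evaluate_true_values; infer_instance

-- ===== CLAIM (what is proved, stated in full; the proofs are below) =====
def Claim_equal_evaluate_true_values : Prop := ∀ (inputs : List (Int × List String)), Dom_evaluate_true_values inputs → Pre_evaluate_true_values inputs → Spec_evaluate_true_values inputs (evaluate_true_values inputs)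

-- ===== LEMMAS AND PROOFS =====

-- reference single-character splitter (proof-side only)
def pvSplit1 (d : Char) : List Char → List (List Char)
  | [] => [[]]
  | c :: cs =>
      let r := pvSplit1 d cs
      if c = d then [] :: r else (c :: r.headI) :: r.tail

lemma pvSplit1_ne_nil (d : Char) (l : List Char) : pvSplit1 d l ≠ [] := by
  cases l with
  | nil => simp [pvSplit1]
  | cons c cs => by_cases h : c = d <;> simp [pvSplit1, h]

lemma pvSplit1_cons_self (d : Char) (l : List Char) :
    pvSplit1 d l = (pvSplit1 d l).headI :: (pvSplit1 d l).tail := by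
  cases h : pvSplit1 d l with
  | nil => exact absurd h (pvSplit1_ne_nil d l)
  | cons a as => simp

-- PySem.Chars.splitOn.go on a single-character separator computes pvSplit1
lemma pvGo_eq (d : Char) :
    ∀ (l : List Char) (fuel : Nat) (cur : List Char) (acc : List (List Char)),
      l.length < fuel →
      PySem.Chars.splitOn.go [d] fuel l cur acc =
        acc.reverse ++ ((cur.reverse ++ (pvSplit1 d l).headI) :: (pvSplit1 d l).tail) := by
  intro l
  induction l with
  | nil =>
      intro fuel cur acc h
      cases fuel with
      | zero => omega
      | succ f => simp [PySem.Chars.splitOn.go, pvSplit1]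
  | cons c rest ih =>
      intro fuel cur acc h
      cases fuel with
      | zero => simp at h
      | succ f =>
          by_cases hc : c = d
          · subst hc
            have hpre : List.isPrefixOf [c] (c :: rest) = true := by simp [List.isPrefixOf]
            rw [PySem.Chars.splitOn.go, if_pos hpre]
            simp only [List.length_cons] at h
            simp only [List.length_cons, List.length_nil, List.drop_succ_cons, List.drop_zero]
            rw [ih f [] (cur.reverse :: acc) (by omega)]
            conv_rhs => rw [show pvSplit1 c (c :: rest) = [] :: pvSplit1 c rest by
              simp [pvSplit1]]
            rw [pvSplit1_cons_self c rest]
            simp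
          · have hpre : List.isPrefixOf [d] (c :: rest) = false := by
              simp [List.isPrefixOf]; exact fun hdc => absurd hdc.symm hc
            rw [PySem.Chars.splitOn.go, if_neg (by simp [hpre])]
            simp only [List.length_cons] at h
            rw [ih f (c :: cur) acc (by omega)]
            conv_rhs => rw [show pvSplit1 d (c :: rest)
              = (c :: (pvSplit1 d rest).headI) :: (pvSplit1 d rest).tail by
              simp [pvSplit1, hc]]
            simp

lemma pvSplitOn_eq (d : Char) (l : List Char) :
    PySem.Chars.splitOn l [d] = pvSplit1 d l := by
  rw [PySem.Chars.splitOn, pvGo_eq d l (l.length + 1) [] [] (by omega)]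
  simp [← pvSplit1_cons_self d l]

-- if d does not occur in l, pvSplit1 returns the single piece [l]
lemma pvSplit1_not_mem (d : Char) (l : List Char) (h : d ∉ l) : pvSplit1 d l = [l] := by
  induction l with
  | nil => rfl
  | cons c cs ih =>
      simp only [List.mem_cons, not_or] at h
      simp [pvSplit1, Ne.symm h.1, ih h.2]

-- the value A assigns to one '+'-piece (product of its '*'-tokens)
def pvValElem (e : List Char) : Int := pvProdA (pvSplit1 '*' e)

-- B's state machine as a recursive function on the remaining characters
def pvTerms (p : Int) (b : List Char) : List Char → Int
  | [] => p * pvIntOf b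
  | c :: t =>
      if c = '+' then p * pvIntOf b + pvTerms 1 [] t
      else if c = '*' then pvTerms (p * pvIntOf b) [] t
      else pvTerms p (b ++ [c]) t

-- product continuation: p times the product of e's '*'-tokens, the first token prefixed by b
def pvProdCont (p : Int) (b : List Char) (e : List Char) : Int :=
  ((pvSplit1 '*' e).tail).foldl (fun v n => v * pvIntOf n)
    (p * pvIntOf (b ++ (pvSplit1 '*' e).headI))

lemma pvProdCont_trivial (e : List Char) : pvProdCont 1 [] e = pvValElem e := by
  rw [pvProdCont, pvValElem, pvProdA]
  conv_rhs => rw [pvSplit1_cons_self '*' e]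
  simp

lemma pvProdCont_nil (p : Int) (b : List Char) : pvProdCont p b [] = p * pvIntOf b := by
  simp [pvProdCont, pvSplit1]

lemma pvProdCont_star (p : Int) (b e : List Char) :
    pvProdCont p b ('*' :: e) = pvProdCont (p * pvIntOf b) [] e := by
  rw [pvProdCont, pvProdCont]
  rw [show pvSplit1 '*' ('*' :: e) = [] :: pvSplit1 '*' e by simp [pvSplit1]]
  simp only [List.headI_cons, List.tail_cons, List.append_nil, List.nil_append]
  conv_lhs => rw [pvSplit1_cons_self '*' e]
  rw [List.foldl_cons]

lemma pvProdCont_char (p : Int) (b : List Char) (c : Char) (e : List Char) (hc : c ≠ '*') :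
    pvProdCont p b (c :: e) = pvProdCont p (b ++ [c]) e := by
  rw [pvProdCont, pvProdCont]
  rw [show pvSplit1 '*' (c :: e)
        = (c :: (pvSplit1 '*' e).headI) :: (pvSplit1 '*' e).tail by simp [pvSplit1, hc]]
  simp

-- the key invariant: scanning t from state (p, b) evaluates the '+'/'*' structure of t
lemma pvTerms_eq (t : List Char) : ∀ (p : Int) (b : List Char),
    pvTerms p b t =
      pvProdCont p b (pvSplit1 '+' t).headI +
        (((pvSplit1 '+' t).tail).map pvValElem).sum := by
  induction t with
  | nil => intro p b; simp [pvTerms, pvSplit1, pvProdCont]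
  | cons c t ih =>
      intro p b
      obtain ⟨e, rest, hsplit⟩ : ∃ e rest, pvSplit1 '+' t = e :: rest :=
        ⟨_, _, pvSplit1_cons_self '+' t⟩
      by_cases hp : c = '+'
      · subst hp
        rw [pvTerms, if_pos rfl, ih 1 [], hsplit]
        rw [show pvSplit1 '+' ('+' :: t) = [] :: pvSplit1 '+' t by simp [pvSplit1], hsplit]
        simp only [List.headI_cons, List.tail_cons, List.map_cons, List.sum_cons,
          pvProdCont_nil, pvProdCont_trivial]
      · by_cases hs : c = '*'
        · subst hs
          rw [pvTerms, if_neg (by decide), if_pos rfl, ih (p * pvIntOf b) [], hsplit]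
          rw [show pvSplit1 '+' ('*' :: t)
                = ('*' :: (pvSplit1 '+' t).headI) :: (pvSplit1 '+' t).tail by
              simp [pvSplit1], hsplit]
          simp only [List.headI_cons, List.tail_cons, pvProdCont_star]
        · rw [pvTerms, if_neg hp, if_neg hs, ih p (b ++ [c]), hsplit]
          rw [show pvSplit1 '+' (c :: t)
                = (c :: (pvSplit1 '+' t).headI) :: (pvSplit1 '+' t).tail by
              simp [pvSplit1, hp], hsplit]
          simp only [List.headI_cons, List.tail_cons, pvProdCont_char p b c e hs]

-- B's foldl scan computes pvTerms
lemma pvScan_eq (t : List Char) : ∀ (a p : Int) (b : List Char),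
    (let st := t.foldl pvStepB (a, p, b); st.1 + st.2.1 * pvIntOf st.2.2)
      = a + pvTerms p b t := by
  induction t with
  | nil => intro a p b; simp [pvTerms]
  | cons c t ih =>
      intro a p b
      by_cases hp : c = '+'
      · subst hp
        rw [List.foldl_cons, show pvStepB (a, p, b) '+' = (a + p * pvIntOf b, 1, []) by
          simp [pvStepB]]
        rw [ih]; rw [pvTerms, if_pos rfl]; ring
      · by_cases hs : c = '*'
        · subst hs
          rw [List.foldl_cons, show pvStepB (a, p, b) '*' = (a, p * pvIntOf b, []) by
            simp [pvStepB]]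
          rw [ih]; rw [pvTerms, if_neg (by decide), if_pos rfl]
        · rw [List.foldl_cons, show pvStepB (a, p, b) c = (a, p, b ++ [c]) by
            simp [pvStepB, hp, hs]]
          rw [ih]; rw [pvTerms, if_neg hp, if_neg hs]

-- A's per-piece step equals adding pvValElem
lemma pvElemA_eq (s : Int) (e : List Char) : pvElemA s e = s + pvValElem e := by
  rw [pvElemA, pvValElem]
  by_cases h : PySem.Chars.isIn ['*'] e = false
  · rw [if_pos h]
    have hmem : ('*' : Char) ∉ e := by
      intro hm
      have : PySem.Chars.isIn ['*'] e = true := by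
        rw [PySem.Chars.isIn_iff_infix]
        exact (List.singleton_infix_iff '*' e).mpr hm
      simp [this] at h
    rw [pvSplit1_not_mem _ _ hmem]
    simp [pvProdA]
  · rw [if_neg h, pvSplitOn_eq]

-- A's per-expression sum equals B's per-expression scan value
lemma pvSumA_eq_pvValueB (t : List Char) : pvSumA t = pvValueB t := by
  rw [pvValueB]
  rw [pvScan_eq t 0 1 []]
  rw [pvTerms_eq t 1 []]
  rw [pvProdCont_trivial]
  have hfold : ∀ (l : List (List Char)) (s : Int),
      l.foldl pvElemA s = s + (l.map pvValElem).sum := by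
    intro l
    induction l with
    | nil => intro s; simp
    | cons x xs ih =>
        intro s; rw [List.foldl_cons, pvElemA_eq, ih]
        simp only [List.map_cons, List.sum_cons]; ring
  rw [pvSumA, pvSplitOn_eq]
  conv_lhs => rw [pvSplit1_cons_self '+' t]
  rw [List.foldl_cons, pvElemA_eq, hfold]
  ring

-- outer loops: A's nested foldl equals B's flatMap/filter/sum
lemma pvOuter_eq (inputs : List (Int × List String)) : ∀ (acc : Int),
    inputs.foldl (fun true_vals_sum tuples =>
      tuples.2.foldl (fun true_vals_sum test_result =>
        let sum_val := pvSumA test_result.toList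
        if sum_val = tuples.1 then true_vals_sum + sum_val else true_vals_sum)
        true_vals_sum) acc
    = acc + (inputs.flatMap (fun p =>
        (p.2.map (fun e => pvValueB e.toList)).filter (fun v => v == p.1))).sum := by
  induction inputs with
  | nil => intro acc; simp
  | cons p ps ih =>
      intro acc
      rw [List.foldl_cons, ih]
      rw [List.flatMap_cons, List.sum_append]
      have hinner : ∀ (es : List String) (a : Int),
          es.foldl (fun s e =>
            let sum_val := pvSumA e.toList
            if sum_val = p.1 then s + sum_val else s) a
          = a + ((es.map (fun e => pvValueB e.toList)).filter (fun v => v == p.1)).sum := by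
        intro es
        induction es with
        | nil => intro a; simp
        | cons e es ihe =>
            intro a
            rw [List.foldl_cons, ihe]
            simp only [List.map_cons, List.filter_cons, pvSumA_eq_pvValueB]
            by_cases hv : pvValueB e.toList = p.1
            · simp [hv]; ring
            · simp [hv]
      rw [hinner]
      ring

-- ===== VERDICT (by name: the statement is the Claim_ definition above) =====
theorem evaluate_true_values_spec : Claim_equal_evaluate_true_values := by
  intro inputs _ _
  show evaluate_true_values inputs = evaluate_true_values_alt inputs
  rw [evaluate_true_values, evaluate_true_values_alt, pvOuter_eq inputs 0]
  simp
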